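-- pv_equiv track=rewrite | github.com/cesarsanchez1/My-Leetcode-Solutions | 2363-merge-similar-items/2363-merge-similar-items.py | mergeSimilarItems
-- ===== SOURCE A (Python) =====
-- from typing import List
--
-- def mergeSimilarItems(items1: List[List[int]], items2: List[List[int]]) -> List[List[int]]:
--
--     items1.sort()
--     items2.sort()
--
--     freq = {}
--
--     for item in items1:
--         if item[0] in freq:
--             freq[item[0]]+=item[1]
--         else:
--             freq[item[0]]=item[1]
--
--     for item in items2:
--         if item[0] in freq:
--             freq[item[0]]+=item[1]
--         else:
--             freq[item[0]]=item[1]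
--
--     res = []
--
--     for i in freq:
--         res.append([i, freq[i]])
--
--     res.sort()
--
--     return res
-- ===== SOURCE B (Python) =====
-- from typing import List
--
-- def mergeSimilarItems(items1: List[List[int]], items2: List[List[int]]) -> List[List[int]]:
--     # sorts both arguments in place, like the original
--     items1.sort()
--     items2.sort()
--     pairs = items1 + items2
--     keys = sorted({p[0] for p in pairs})
--     return [[k, sum(p[1] for p in pairs if p[0] == k)] for k in keys]
-- ===== Notes on version B (the rewrite author's own statement) =====
-- stated objective: simpler
-- what changed: Replaces A's dict accumulation plus a final sort of the rows by sorting the distinct keys once and computing each key's total with a direct filter-sum over the concatenated lists (no dict at all).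
import Mathlib
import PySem

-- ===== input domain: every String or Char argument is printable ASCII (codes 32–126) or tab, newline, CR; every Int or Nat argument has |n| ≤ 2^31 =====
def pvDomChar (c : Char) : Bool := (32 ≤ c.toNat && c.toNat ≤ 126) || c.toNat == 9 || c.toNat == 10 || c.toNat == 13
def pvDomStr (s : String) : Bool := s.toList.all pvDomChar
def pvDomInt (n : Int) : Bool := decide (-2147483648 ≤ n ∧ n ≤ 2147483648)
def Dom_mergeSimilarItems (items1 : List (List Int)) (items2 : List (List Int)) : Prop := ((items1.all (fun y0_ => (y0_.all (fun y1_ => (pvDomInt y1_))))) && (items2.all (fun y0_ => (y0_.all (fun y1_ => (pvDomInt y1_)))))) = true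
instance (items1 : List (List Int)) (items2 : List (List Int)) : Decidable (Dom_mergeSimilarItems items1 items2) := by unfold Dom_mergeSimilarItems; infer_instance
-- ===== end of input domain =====

-- B replaces A's dict-accumulation-then-sort by "sorted distinct keys, then one filter-sum per key"
-- (objective: simpler; equivalence is about the RETURN value — both A and B also sort the two
-- argument lists in place in Python, a side effect not modelled here).

-- ===== PORT A =====
def mergeSimilarItems (items1 : List (List Int)) (items2 : List (List Int)) : List (List Int) :=
  let s1 := PySem.List.sorted items1 (fun x => x) false
  let s2 := PySem.List.sorted items2 (fun x => x) false
  let freq1 := s1.foldl (fun freq item =>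
    if freq.contains (PySem.List.pyGetD item 0 0)
    then freq.insert (PySem.List.pyGetD item 0 0)
           (freq.getD (PySem.List.pyGetD item 0 0) 0 + PySem.List.pyGetD item 1 0)
    else freq.insert (PySem.List.pyGetD item 0 0) (PySem.List.pyGetD item 1 0)) PySem.Dict.empty
  let freq := s2.foldl (fun freq item =>
    if freq.contains (PySem.List.pyGetD item 0 0)
    then freq.insert (PySem.List.pyGetD item 0 0)
           (freq.getD (PySem.List.pyGetD item 0 0) 0 + PySem.List.pyGetD item 1 0)
    else freq.insert (PySem.List.pyGetD item 0 0) (PySem.List.pyGetD item 1 0)) freq1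
  let res := freq.keys.foldl (fun res i => res ++ [[i, freq.getD i 0]]) []
  PySem.List.sorted res (fun x => x) false

-- ===== PORT B =====
def mergeSimilarItems_alt (items1 : List (List Int)) (items2 : List (List Int)) : List (List Int) :=
  let s1 := PySem.List.sorted items1 (fun x => x) false
  let s2 := PySem.List.sorted items2 (fun x => x) false
  let pairs := s1 ++ s2
  let keys := PySem.List.sorted (PySem.Set.ofList (pairs.map (fun p => PySem.List.pyGetD p 0 0))) (fun x => x) false
  keys.map (fun k =>
    [k, ((pairs.filter (fun p => PySem.List.pyGetD p 0 0 == k)).map (fun p => PySem.List.pyGetD p 1 0)).sum])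

-- ===== PRECONDITION & SPEC =====
-- Pre_ excludes items shorter than two entries: on those Python A raises IndexError at item[1]
-- (or item[0]), and B raises there too.
def Pre_mergeSimilarItems (items1 : List (List Int)) (items2 : List (List Int)) : Prop :=
  (∀ it ∈ items1, 2 ≤ it.length) ∧ (∀ it ∈ items2, 2 ≤ it.length)
instance (items1 : List (List Int)) (items2 : List (List Int)) : Decidable (Pre_mergeSimilarItems items1 items2) := by unfold Pre_mergeSimilarItems; infer_instance

def pvWitness_mergeSimilarItems : List (List Int) × List (List Int) := ([[1, 2], [1, 3]], [[2, 1], [1, 4]])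

def Spec_mergeSimilarItems (items1 : List (List Int)) (items2 : List (List Int)) (out : List (List Int)) : Prop := out = mergeSimilarItems_alt items1 items2
instance (items1 : List (List Int)) (items2 : List (List Int)) (out : List (List Int)) : Decidable (Spec_mergeSimilarItems items1 items2 out) := by unfold Spec_mergeSimilarItems; infer_instance

-- ===== CLAIM (what is proved, stated in full; the proofs are below) =====
def Claim_equal_mergeSimilarItems : Prop := ∀ (items1 : List (List Int)) (items2 : List (List Int)), Dom_mergeSimilarItems items1 items2 → Pre_mergeSimilarItems items1 items2 → Spec_mergeSimilarItems items1 items2 (mergeSimilarItems items1 items2)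

-- ===== LEMMAS AND PROOFS =====

-- the key / value of one item, as both ports read them
def pvKey (p : List Int) : Int := PySem.List.pyGetD p 0 0
def pvVal (p : List Int) : Int := PySem.List.pyGetD p 1 0

-- the per-key total over a list of items
def pvTotal (L : List (List Int)) (k : Int) : Int :=
  ((L.filter (fun p => pvKey p == k)).map pvVal).sum

-- A's dict-update step, with its two branches collapsed into one insert
lemma pvStep_eq (freq : PySem.Dict Int Int) (item : List Int) :
    (if freq.contains (PySem.List.pyGetD item 0 0)
     then freq.insert (PySem.List.pyGetD item 0 0)
            (freq.getD (PySem.List.pyGetD item 0 0) 0 + PySem.List.pyGetD item 1 0)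
     else freq.insert (PySem.List.pyGetD item 0 0) (PySem.List.pyGetD item 1 0))
    = freq.insert (pvKey item) (freq.getD (pvKey item) 0 + pvVal item) := by
  by_cases h : freq.contains (PySem.List.pyGetD item 0 0)
  · simp [h, pvKey, pvVal]
  · simp only [Bool.not_eq_true] at h
    simp [h, pvKey, pvVal, PySem.Dict.getD_of_not_contains]

-- lookup after A's accumulation loop: initial value plus the per-key total
lemma pvGetD_fold (L : List (List Int)) (d : PySem.Dict Int Int) (k : Int) :
    (L.foldl (fun freq item => freq.insert (pvKey item) (freq.getD (pvKey item) 0 + pvVal item)) d).getD k 0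
    = d.getD k 0 + pvTotal L k := by
  induction L generalizing d with
  | nil => simp [pvTotal]
  | cons it L ih =>
    simp only [List.foldl_cons, ih, pvTotal, List.filter_cons]
    by_cases h : pvKey it = k
    · simp [h]; ring
    · simp [PySem.Dict.getD_insert, Ne.symm h, h]
lemma pvRow_lt {a b : Int} (ta tb : Int) (h : a < b) : ([a, ta] : List Int) < [b, tb] :=
  List.cons_lt_cons_iff.mpr (Or.inl h)

-- sorting the rows of strictly-increasing-key data = mapping over the sorted keys
lemma pvSorted_map_rows (K : List Int) (g : Int → Int)
    (hK : ∃ xs : List Int, K = PySem.Set.ofList xs) :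
    PySem.List.sorted (K.map (fun k => [k, g k])) (fun x => x) false
    = (PySem.List.sorted K (fun x => x) false).map (fun k => [k, g k]) := by
  have hdec : (fun (a b : List Int) => a.decidableLT b)
      = ((inferInstance : LinearOrder (List Int)).toDecidableLT) := by
    funext a b; exact Subsingleton.elim _ _
  rw [hdec]
  apply PySem.List.sorted_eq_of_perm_of_pairwise_lt
  · exact ((PySem.List.sorted_perm K (fun x => x) false).map _)
  · obtain ⟨xs, rfl⟩ := hK
    exact (PySem.List.sorted_ofList_pairwise_lt xs).map _ (fun a b h => pvRow_lt _ _ h)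

theorem pv_main (items1 items2 : List (List Int)) :
    mergeSimilarItems items1 items2 = mergeSimilarItems_alt items1 items2 := by
  unfold mergeSimilarItems mergeSimilarItems_alt
  simp only [funext (fun freq => funext (fun item => pvStep_eq freq item)), ← List.foldl_append,
    PySem.List.foldl_append_singleton_eq_map, List.nil_append]
  set L := PySem.List.sorted items1 (fun x => x) false ++ PySem.List.sorted items2 (fun x => x) false with hL
  set F := L.foldl (fun freq item => freq.insert (pvKey item) (freq.getD (pvKey item) 0 + pvVal item)) PySem.Dict.empty with hF
  have hkeys : F.keys = PySem.Set.ofList (L.map pvKey) := by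
    rw [hF, PySem.Dict.keys_foldl_insert_key L pvKey
      (fun freq item => freq.getD (pvKey item) 0 + pvVal item) PySem.Dict.empty]
    simp [PySem.Dict.keys_empty, PySem.Set.update, PySem.Set.ofList]
  have hget : ∀ k, F.getD k 0 = pvTotal L k := by
    intro k
    rw [hF, pvGetD_fold]
    simp [PySem.Dict.getD_empty]
  have hrows : F.keys.map (fun i => [i, F.getD i 0]) = F.keys.map (fun k => [k, pvTotal L k]) := by
    exact List.map_congr_left (fun k _ => by rw [hget k])
  rw [hrows, hkeys, pvSorted_map_rows (PySem.Set.ofList (L.map pvKey)) (pvTotal L) ⟨L.map pvKey, rfl⟩]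
  rfl

-- ===== VERDICT (by name: the statement is the Claim_ definition above) =====
theorem mergeSimilarItems_spec : Claim_equal_mergeSimilarItems := by
  intro items1 items2 _ _
  unfold Spec_mergeSimilarItems
  exact pv_main items1 items2
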